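-- pv_equiv track=rewrite | github.com/ricbit/puzzles | torto.dlx2.py | remove_symmetry
-- ===== SOURCE A (Python) =====
-- def flipx(p):
--   return (p[0], 2 - p[1])
--
-- def flipy(p):
--   return (5 - p[0], p[1])
--
-- def flipxp(p):
--   return tuple(map(flipx, p))
--
-- def flipyp(p):
--   return tuple(map(flipy, p))
--
-- def remove_symmetry(seq):
--   seen = set()
--   for s in seq:
--     q = tuple(s)
--     if q not in seen:
--       yield s
--     seen.add(q)
--     seen.add(flipxp(q))
--     seen.add(flipyp(q))
--     seen.add(flipyp(flipxp(q)))
-- ===== SOURCE B (Python) =====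
-- def flipx(p):
--   return (p[0], 2 - p[1])
--
-- def flipy(p):
--   return (5 - p[0], p[1])
--
-- def flipxp(p):
--   return tuple(map(flipx, p))
--
-- def flipyp(p):
--   return tuple(map(flipy, p))
--
-- def remove_symmetry(seq):
--   seen = set()
--   for s in seq:
--     q = tuple(s)
--     canon = min(q, flipxp(q), flipyp(q), flipyp(flipxp(q)))
--     if canon not in seen:
--       yield s
--     seen.add(canon)
-- ===== Notes on version B (the rewrite author's own statement) =====
-- stated objective: simpler
-- what changed: B deduplicates by a canonical representative (the minimum of the four-element flip orbit) kept in one set, instead of inserting all four flip variants of every item and testing the raw tuple.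
import Mathlib
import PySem

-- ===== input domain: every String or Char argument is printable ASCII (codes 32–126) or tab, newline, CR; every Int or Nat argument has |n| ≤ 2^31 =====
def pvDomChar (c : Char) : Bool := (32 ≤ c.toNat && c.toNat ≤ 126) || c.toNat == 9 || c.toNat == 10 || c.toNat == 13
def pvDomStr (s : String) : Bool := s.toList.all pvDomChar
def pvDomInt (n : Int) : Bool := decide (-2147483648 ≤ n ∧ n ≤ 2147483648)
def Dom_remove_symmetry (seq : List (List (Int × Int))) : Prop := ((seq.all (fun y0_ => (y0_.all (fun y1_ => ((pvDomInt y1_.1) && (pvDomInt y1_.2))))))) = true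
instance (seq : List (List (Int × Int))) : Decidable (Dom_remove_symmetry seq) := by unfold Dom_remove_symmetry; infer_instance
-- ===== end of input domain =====

-- B deduplicates by one canonical orbit representative (min of the four flips) per item instead of
-- inserting all four flip variants of every item into the seen-set; objective: simpler (one insert
-- and one membership test per item), not claimed faster.

-- shared helpers (both Pythons use the same flipx/flipy/flipxp/flipyp)
def pvFx (p : Int × Int) : Int × Int := (p.1, 2 - p.2)
def pvFy (p : Int × Int) : Int × Int := (5 - p.1, p.2)
def pvFxp (l : List (Int × Int)) : List (Int × Int) := l.map pvFx
def pvFyp (l : List (Int × Int)) : List (Int × Int) := l.map pvFy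

-- ===== PORT A =====
def pvStepA (st : List (List (Int × Int)) × PySem.Set (List (Int × Int))) (s : List (Int × Int)) :
    List (List (Int × Int)) × PySem.Set (List (Int × Int)) :=
  let q := s
  let out := if st.2.contains q then st.1 else st.1 ++ [s]
  (out, ((((st.2.add q).add (pvFxp q)).add (pvFyp q)).add (pvFyp (pvFxp q))))

def remove_symmetry (seq : List (List (Int × Int))) : List (List (Int × Int)) :=
  (seq.foldl pvStepA ([], PySem.Set.empty)).1

-- ===== PORT B =====
-- Python's tuple comparison is lexicographic on lexicographically-ordered pairs: we transport the
-- lists into List (Int ×ₗ Int), where Mathlib's list order is exactly that, take `min`, and map back.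
def pvToL (l : List (Int × Int)) : List (Int ×ₗ Int) := l.map (fun p => toLex p)
def pvOfL (l : List (Int ×ₗ Int)) : List (Int × Int) := l.map (fun p => ofLex p)

def pvCanon (q : List (Int × Int)) : List (Int × Int) :=
  pvOfL (min (pvToL q) (min (pvToL (pvFxp q)) (min (pvToL (pvFyp q)) (pvToL (pvFyp (pvFxp q))))))

def pvStepB (st : List (List (Int × Int)) × PySem.Set (List (Int × Int))) (s : List (Int × Int)) :
    List (List (Int × Int)) × PySem.Set (List (Int × Int)) :=
  let c := pvCanon s
  let out := if st.2.contains c then st.1 else st.1 ++ [s]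
  (out, st.2.add c)

def remove_symmetry_alt (seq : List (List (Int × Int))) : List (List (Int × Int)) :=
  (seq.foldl pvStepB ([], PySem.Set.empty)).1

-- ===== PRECONDITION & SPEC =====
def Spec_remove_symmetry (seq : List (List (Int × Int))) (out : List (List (Int × Int))) : Prop := out = remove_symmetry_alt seq
instance (seq : List (List (Int × Int))) (out : List (List (Int × Int))) : Decidable (Spec_remove_symmetry seq out) := by unfold Spec_remove_symmetry; infer_instance

-- ===== CLAIM (what is proved, stated in full; the proofs are below) =====
def Claim_equal_remove_symmetry : Prop := ∀ (seq : List (List (Int × Int))), Dom_remove_symmetry seq → Spec_remove_symmetry seq (remove_symmetry seq)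

-- ===== LEMMAS AND PROOFS =====

theorem pvFxp_pvFxp (l : List (Int × Int)) : pvFxp (pvFxp l) = l := by
  simp only [pvFxp, List.map_map]
  have h : ∀ x ∈ l, (pvFx ∘ pvFx) x = x := by
    intro x _; cases x with | mk a b => simp [pvFx, Function.comp]
  rw [List.map_congr_left h]; simp

theorem pvFyp_pvFyp (l : List (Int × Int)) : pvFyp (pvFyp l) = l := by
  simp only [pvFyp, List.map_map]
  have h : ∀ x ∈ l, (pvFy ∘ pvFy) x = x := by
    intro x _; cases x with | mk a b => simp [pvFy, Function.comp]
  rw [List.map_congr_left h]; simp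

theorem pvFxp_pvFyp (l : List (Int × Int)) : pvFxp (pvFyp l) = pvFyp (pvFxp l) := by
  simp only [pvFxp, pvFyp, List.map_map]
  apply List.map_congr_left
  intro x _; cases x with | mk a b => simp [pvFx, pvFy, Function.comp]

-- the flip orbit of an item, in the order A inserts it
def pvOrb (q : List (Int × Int)) : List (List (Int × Int)) :=
  [q, pvFxp q, pvFyp q, pvFyp (pvFxp q)]

theorem pvMin4_perm {α : Type} [LinearOrder α] (a b c d : α) :
    min a (min b (min c d)) = min b (min a (min d c)) := by
  rw [min_comm d c, min_left_comm a b]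

theorem pvCanon_fxp (q : List (Int × Int)) : pvCanon (pvFxp q) = pvCanon q := by
  unfold pvCanon
  rw [pvFxp_pvFxp,
    ← pvMin4_perm (pvToL q) (pvToL (pvFxp q)) (pvToL (pvFyp q)) (pvToL (pvFyp (pvFxp q)))]

theorem pvCanon_fyp (q : List (Int × Int)) : pvCanon (pvFyp q) = pvCanon q := by
  unfold pvCanon
  rw [pvFxp_pvFyp, pvFyp_pvFyp, pvFyp_pvFyp]
  -- goal: min (fyp) (min (fyp fxp) (min q (fxp q))) = min q (min fxp (min fyp (fyp fxp)))
  rw [min_comm (pvToL (pvFyp q)) (min (pvToL (pvFyp (pvFxp q))) (min (pvToL q) (pvToL (pvFxp q))))]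
  rw [min_comm (pvToL (pvFyp (pvFxp q))) (min (pvToL q) (pvToL (pvFxp q)))]
  rw [min_assoc, min_assoc, min_comm (pvToL (pvFyp (pvFxp q))) (pvToL (pvFyp q))]

theorem pvCanon_fypfxp (q : List (Int × Int)) :
    pvCanon (pvFyp (pvFxp q)) = pvCanon q := by
  rw [pvCanon_fyp, pvCanon_fxp]

theorem pvCanon_eq_of_mem (q q' : List (Int × Int)) (h : q' ∈ pvOrb q) :
    pvCanon q' = pvCanon q := by
  simp only [pvOrb, List.mem_cons, List.not_mem_nil, or_false] at h
  rcases h with h | h | h | h <;> subst h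
  · rfl
  · exact pvCanon_fxp q
  · exact pvCanon_fyp q
  · exact pvCanon_fypfxp q

theorem pvOfL_pvToL (l : List (Int × Int)) : pvOfL (pvToL l) = l := by
  induction l with
  | nil => rfl
  | cons a t ih => simp_all [pvOfL, pvToL]

theorem pvCanon_mem_orb (q : List (Int × Int)) : pvCanon q ∈ pvOrb q := by
  unfold pvCanon pvOrb
  rcases min_choice (pvToL (pvFyp q)) (pvToL (pvFyp (pvFxp q))) with h1 | h1 <;>
    rw [h1] <;>
    [rcases min_choice (pvToL (pvFxp q)) (pvToL (pvFyp q)) with h2 | h2;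
     rcases min_choice (pvToL (pvFxp q)) (pvToL (pvFyp (pvFxp q))) with h2 | h2] <;>
    rw [h2] <;>
    [rcases min_choice (pvToL q) (pvToL (pvFxp q)) with h3 | h3;
     rcases min_choice (pvToL q) (pvToL (pvFyp q)) with h3 | h3;
     rcases min_choice (pvToL q) (pvToL (pvFxp q)) with h3 | h3;
     rcases min_choice (pvToL q) (pvToL (pvFyp (pvFxp q))) with h3 | h3] <;>
    rw [h3, pvOfL_pvToL] <;> simp

theorem pvOrb_mem_iff (q q' : List (Int × Int)) (h : q' ∈ pvOrb q) :
    ∀ x, x ∈ pvOrb q' ↔ x ∈ pvOrb q := by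
  intro x
  simp only [pvOrb, List.mem_cons, List.not_mem_nil, or_false] at h ⊢
  rcases h with h | h | h | h <;> subst h <;>
    simp only [pvFxp_pvFxp, pvFyp_pvFyp, pvFxp_pvFyp] <;> tauto

theorem pvMem_orb_iff_canon (q q' : List (Int × Int)) :
    q' ∈ pvOrb q ↔ pvCanon q' = pvCanon q := by
  constructor
  · exact pvCanon_eq_of_mem q q'
  · intro h
    have h1 := pvCanon_mem_orb q'
    have h2 := pvCanon_mem_orb q
    have hq' : q' ∈ pvOrb (pvCanon q') := by
      rw [pvOrb_mem_iff q' (pvCanon q') h1]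
      simp [pvOrb]
    rw [h] at hq'
    rw [pvOrb_mem_iff q (pvCanon q) h2] at hq'
    exact hq'

theorem pvFold_agree (seq : List (List (Int × Int))) :
    ∀ (acc : List (List (Int × Int))) (SA SB : PySem.Set (List (Int × Int))),
    (∀ q, q ∈ SA ↔ pvCanon q ∈ SB) →
    (seq.foldl pvStepA (acc, SA)).1 = (seq.foldl pvStepB (acc, SB)).1 := by
  induction seq with
  | nil => intro acc SA SB _; rfl
  | cons s t ih =>
    intro acc SA SB h
    have hg : SA.contains s = SB.contains (pvCanon s) := by
      have h' : SA.contains s = true ↔ SB.contains (pvCanon s) = true := by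
        rw [PySem.Set.contains_iff, PySem.Set.contains_iff]; exact h s
      revert h'
      cases SA.contains s <;> cases SB.contains (pvCanon s) <;> simp
    simp only [List.foldl_cons, pvStepA, pvStepB, hg]
    apply ih
    intro q
    have hb : (q = s ∨ q = pvFxp s ∨ q = pvFyp s ∨ q = pvFyp (pvFxp s)) ↔
        pvCanon q = pvCanon s := by
      have := pvMem_orb_iff_canon s q
      simpa [pvOrb] using this
    simp only [PySem.Set.mem_add, h q]
    tauto

-- ===== VERDICT (by name: the statement is the Claim_ definition above) =====
theorem remove_symmetry_spec : Claim_equal_remove_symmetry := by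
  intro seq _
  show remove_symmetry seq = remove_symmetry_alt seq
  unfold remove_symmetry remove_symmetry_alt
  apply pvFold_agree
  intro q
  simp [PySem.Set.empty]
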